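-- pv_equiv track=rewrite | github.com/makaires77/ppgcs | source/domain/gml_pdi_kgraph.py | limpar_questoes
-- ===== SOURCE A (Python) =====
-- def limpar_questoes(string_questoes):
--     """
--     Transforma uma string de questões em uma lista de questões,
--     considerando diferentes separadores.
--
--     Args:
--         string_questoes: A string contendo as questões,
--                         separadas por '\n' e/ou ';'.
--
--     Returns:
--         Uma lista de strings, onde cada string representa uma questão.
--     """
--     questoes = []
--     for questao in string_questoes.split('\n'):
--         for subquestao in questao.split(';'):
--             subquestao = subquestao.strip()
--             if subquestao:
--                 questoes.append(subquestao.strip())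
--     return questoes
-- ===== SOURCE B (Python) =====
-- def limpar_questoes(string_questoes):
--     """Single-pass scan: cut at '\n' or ';' while walking the characters once,
--     flushing each stripped, non-empty segment."""
--     questoes = []
--     cur = ''
--     for ch in string_questoes:
--         if ch == '\n' or ch == ';':
--             t = cur.strip()
--             if t:
--                 questoes.append(t)
--             cur = ''
--         else:
--             cur += ch
--     t = cur.strip()
--     if t:
--         questoes.append(t)
--     return questoes
-- ===== Notes on version B (the rewrite author's own statement) =====
-- stated objective: alternative
-- what changed: Replaces the nested split-by-newline-then-split-by-semicolon double loop with a single left-to-right character scan that cuts at either separator and flushes each stripped non-empty segment as it goes.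
import Mathlib
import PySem

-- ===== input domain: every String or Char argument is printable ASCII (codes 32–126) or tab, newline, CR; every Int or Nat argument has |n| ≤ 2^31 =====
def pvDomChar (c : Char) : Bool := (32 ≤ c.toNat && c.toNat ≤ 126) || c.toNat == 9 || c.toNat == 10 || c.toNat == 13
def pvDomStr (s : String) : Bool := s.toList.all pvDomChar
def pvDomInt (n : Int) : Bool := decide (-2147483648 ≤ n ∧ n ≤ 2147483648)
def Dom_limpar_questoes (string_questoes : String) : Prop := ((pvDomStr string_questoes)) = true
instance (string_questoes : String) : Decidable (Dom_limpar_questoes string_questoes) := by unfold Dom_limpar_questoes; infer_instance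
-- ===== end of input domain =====

-- B replaces A's nested split('\n')-then-split(';') loops by one left-to-right character scan
-- that cuts at either separator; same return value, no side effects involved (objective: alternative).

-- ===== PORT A =====
def limpar_questoes (string_questoes : String) : List String :=
  (PySem.Chars.splitOn string_questoes.toList ['\n']).foldl
    (fun questoes questao =>
      (PySem.Chars.splitOn questao [';']).foldl
        (fun qs sub =>
          let sub2 := PySem.Chars.strip sub
          if sub2 ≠ [] then qs ++ [String.mk (PySem.Chars.strip sub2)] else qs)
        questoes)
    []

-- ===== PORT B =====
def limpar_questoes_alt (string_questoes : String) : List String :=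
  let st := string_questoes.toList.foldl
    (fun (st : List String × List Char) ch =>
      if ch = '\n' ∨ ch = ';' then
        let t := PySem.Chars.strip st.2
        ((if t ≠ [] then st.1 ++ [String.mk t] else st.1), [])
      else (st.1, st.2 ++ [ch]))
    ([], [])
  let t := PySem.Chars.strip st.2
  if t ≠ [] then st.1 ++ [String.mk t] else st.1

-- ===== PRECONDITION & SPEC =====
def Spec_limpar_questoes (string_questoes : String) (out : List String) : Prop := out = limpar_questoes_alt string_questoes
instance (string_questoes : String) (out : List String) : Decidable (Spec_limpar_questoes string_questoes out) := by unfold Spec_limpar_questoes; infer_instance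

-- ===== CLAIM (what is proved, stated in full; the proofs are below) =====
def Claim_equal_limpar_questoes : Prop := ∀ (string_questoes : String), Dom_limpar_questoes string_questoes → Spec_limpar_questoes string_questoes (limpar_questoes string_questoes)

-- ===== LEMMAS AND PROOFS =====

-- split on a single separator character, as a structural recursion
def splitC (c : Char) : List Char → List (List Char)
  | [] => [[]]
  | x :: xs => if x = c then [] :: splitC c xs else (splitC c xs).modifyHead (x :: ·)

-- split on the character class {'\n', ';'} in one pass
def splitB : List Char → List (List Char)
  | [] => [[]]
  | x :: xs => if x = '\n' ∨ x = ';' then [] :: splitB xs else (splitB xs).modifyHead (x :: ·)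

-- append the stripped segment if non-empty
def flushSeg (acc : List String) (cur : List Char) : List String :=
  if PySem.Chars.strip cur ≠ [] then acc ++ [String.mk (PySem.Chars.strip cur)] else acc

theorem splitC_ne_nil (c : Char) (l : List Char) : splitC c l ≠ [] := by
  cases l with
  | nil => simp [splitC]
  | cons x xs =>
    simp only [splitC]
    split_ifs <;> simp
    intro h; exact splitC_ne_nil c xs (by simpa using congrArg List.length h)

theorem splitB_ne_nil (l : List Char) : splitB l ≠ [] := by
  cases l with
  | nil => simp [splitB]
  | cons x xs =>
    simp only [splitB]
    split_ifs <;> simp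
    intro h; exact splitB_ne_nil xs (by simpa using congrArg List.length h)

theorem modifyHead_fun_id {α : Type} (l : List α) : List.modifyHead (fun x => x) l = l := by
  cases l <;> simp

theorem go_single (c : Char) (l : List Char) : ∀ (fuel : Nat) (cur : List Char) (acc : List (List Char)),
    l.length ≤ fuel →
    PySem.Chars.splitOn.go [c] fuel l cur acc
      = acc.reverse ++ (splitC c l).modifyHead (cur.reverse ++ ·) := by
  induction l with
  | nil =>
    intro fuel cur acc _
    cases fuel <;> simp [PySem.Chars.splitOn.go, splitC]
  | cons x xs ih =>
    intro fuel cur acc h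
    cases fuel with
    | zero => simp at h
    | succ f =>
      rw [PySem.Chars.splitOn.go]
      by_cases hx : x = c
      · subst hx
        rw [if_pos (by simp [List.isPrefixOf])]
        simp only [List.length_cons, List.length_nil, List.drop_succ_cons, List.drop_zero]
        rw [ih f [] (cur.reverse :: acc) (by simpa using h)]
        simp [splitC, modifyHead_fun_id]
      · rw [if_neg (by simp [List.isPrefixOf, Ne.symm hx])]
        rw [ih f (x :: cur) acc (by simpa using Nat.le_of_succ_le_succ h)]
        obtain ⟨hd, tl, he⟩ := List.exists_cons_of_ne_nil (splitC_ne_nil c xs)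
        simp [splitC, hx, he, List.modifyHead]

theorem splitOn_single (c : Char) (l : List Char) :
    PySem.Chars.splitOn l [c] = splitC c l := by
  have := go_single c l (l.length + 1) [] [] (by omega)
  simpa [PySem.Chars.splitOn, modifyHead_fun_id] using this

theorem splitB_eq (l : List Char) :
    splitB l = (splitC '\n' l).flatMap (splitC ';') := by
  induction l with
  | nil => simp [splitB, splitC]
  | cons x xs ih =>
    obtain ⟨hd, tl, he⟩ := List.exists_cons_of_ne_nil (splitC_ne_nil '\n' xs)
    by_cases h1 : x = '\n'
    · subst h1
      simp [splitB, splitC, ih]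
    · by_cases h2 : x = ';'
      · subst h2
        simp [splitB, splitC, h1, he, List.modifyHead] at *
        simpa [he] using ih
      · obtain ⟨hd2, tl2, he2⟩ := List.exists_cons_of_ne_nil (splitC_ne_nil ';' hd)
        simp [splitB, splitC, h1, h2, he, List.modifyHead, ih, he2]

-- strip is idempotent
theorem dropWhile_append_singleton {α : Type} (p : α → Bool) (a : α) (ha : ¬ p a)
    (u : List α) : List.dropWhile p (u ++ [a]) = List.dropWhile p u ++ [a] := by
  induction u with
  | nil => simp [List.dropWhile, ha]
  | cons y ys ih =>
    by_cases hy : p y <;> simp [List.dropWhile, hy, ih]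

theorem strip_strip (l : List Char) :
    PySem.Chars.strip (PySem.Chars.strip l) = PySem.Chars.strip l := by
  unfold PySem.Chars.strip PySem.Chars.lstrip PySem.Chars.rstrip
  set p := PySem.Chars.isspace
  rcases hl : List.dropWhile p l with _ | ⟨a, t⟩
  · simp
  · have ha : ¬ p a := by
      have := List.head?_dropWhile_not p l
      rw [hl] at this; simpa using this
    simp only [List.reverse_cons]
    rw [dropWhile_append_singleton p a ha]
    simp only [List.reverse_append, List.reverse_cons, List.reverse_nil,
      List.nil_append, List.singleton_append]
    rw [List.dropWhile_cons_of_neg ha]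
    simp only [List.reverse_cons, List.reverse_reverse]
    rw [dropWhile_append_singleton p a ha, List.dropWhile_idempotent]
    simp

theorem foldl_flatMap {α β γ : Type} (f : γ → β → γ) (g : α → List β) (l : List α) (b : γ) :
    (l.flatMap g).foldl f b = l.foldl (fun b a => (g a).foldl f b) b := by
  induction l generalizing b with
  | nil => rfl
  | cons x xs ih => simp [List.flatMap_cons, List.foldl_append, ih]

-- A computes foldl flushSeg over the one-pass split
theorem A_eq_foldl (s : String) :
    limpar_questoes s = (splitB s.toList).foldl flushSeg [] := by
  unfold limpar_questoes
  rw [splitOn_single, splitB_eq, foldl_flatMap]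
  congr 1
  funext qs q
  rw [splitOn_single]
  congr 1
  funext a b
  simp only [flushSeg, strip_strip]

-- B's scan invariant
theorem B_scan (l : List Char) : ∀ (acc : List String) (cur : List Char),
    flushSeg (l.foldl
      (fun (st : List String × List Char) ch =>
        if ch = '\n' ∨ ch = ';' then
          let t := PySem.Chars.strip st.2
          ((if t ≠ [] then st.1 ++ [String.mk t] else st.1), [])
        else (st.1, st.2 ++ [ch]))
      (acc, cur)).1
      ((l.foldl
      (fun (st : List String × List Char) ch =>
        if ch = '\n' ∨ ch = ';' then
          let t := PySem.Chars.strip st.2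
          ((if t ≠ [] then st.1 ++ [String.mk t] else st.1), [])
        else (st.1, st.2 ++ [ch]))
      (acc, cur)).2)
      = ((splitB l).modifyHead (cur ++ ·)).foldl flushSeg acc := by
  induction l with
  | nil => intro acc cur; simp [splitB, flushSeg, List.modifyHead]
  | cons x xs ih =>
    intro acc cur
    by_cases hx : x = '\n' ∨ x = ';'
    · obtain ⟨hd, tl, he⟩ := List.exists_cons_of_ne_nil (splitB_ne_nil xs)
      simp only [List.foldl_cons, if_pos hx]
      rw [ih]
      simp [splitB, hx, he, List.modifyHead, flushSeg]
    · obtain ⟨hd, tl, he⟩ := List.exists_cons_of_ne_nil (splitB_ne_nil xs)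
      simp only [List.foldl_cons, if_neg hx]
      rw [ih]
      simp [splitB, hx, he, List.modifyHead]

theorem B_eq_foldl (s : String) :
    limpar_questoes_alt s = (splitB s.toList).foldl flushSeg [] := by
  have h := B_scan s.toList [] []
  obtain ⟨hd, tl, he⟩ := List.exists_cons_of_ne_nil (splitB_ne_nil s.toList)
  exact h.trans (by rw [he]; simp [List.modifyHead])

-- ===== VERDICT (by name: the statement is the Claim_ definition above) =====
theorem limpar_questoes_spec : Claim_equal_limpar_questoes := by
  intro s _
  unfold Spec_limpar_questoes
  rw [A_eq_foldl, B_eq_foldl]
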